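-- pv_equiv track=rewrite | github.com/210B/Programmers | 프로그래머스/PCCP 모의고사/1회/1번 - 외톨이 알파벳/외톨이 알파벳.py | solution
-- ===== SOURCE A (Python) =====
-- def solution(input_string):
--     i = 1
--     while i<len(input_string):
--         if input_string[i]==input_string[i-1]:
--             input_string= input_string[:i] + input_string[i + 1:]
--         else:
--             i+=1
--
--     count = {}
--     for s in input_string:
--         if s in count:
--             count[s] += 1
--         else:
--             count[s] = 1
--     answer = []
--     for cnt in count:
--         if count[cnt] >1:
--             answer.append(cnt)
--     answer.sort()
--     return ''.join(answer) if answer else "N"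
-- ===== SOURCE B (Python) =====
-- def solution(input_string):
--     counts = {}
--     prev = None
--     for ch in input_string:
--         if ch != prev:
--             counts[ch] = counts.get(ch, 0) + 1
--         prev = ch
--     lonely = sorted([ch for ch, c in counts.items() if c > 1])
--     return ''.join(lonely) if lonely else "N"
-- ===== Notes on version B (the rewrite author's own statement) =====
-- stated objective: faster
-- what changed: Instead of A's destructive collapse (repeatedly deleting a duplicate by string slicing) followed by a separate counting pass and a key-filter pass, B never builds the collapsed string: one pass over the original string counts run starts (increment when a char differs from its predecessor), then keys with count>1 are sorted and joined.
import Mathlib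
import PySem

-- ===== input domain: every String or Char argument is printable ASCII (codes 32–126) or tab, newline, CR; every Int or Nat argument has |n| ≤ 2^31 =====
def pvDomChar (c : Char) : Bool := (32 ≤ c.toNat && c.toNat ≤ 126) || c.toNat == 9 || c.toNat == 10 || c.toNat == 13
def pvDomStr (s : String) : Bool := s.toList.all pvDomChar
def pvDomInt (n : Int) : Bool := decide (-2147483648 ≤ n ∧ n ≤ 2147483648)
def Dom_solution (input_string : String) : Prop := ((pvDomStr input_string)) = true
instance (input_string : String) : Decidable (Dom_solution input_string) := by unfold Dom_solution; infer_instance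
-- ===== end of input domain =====

-- B replaces A's quadratic delete-in-place collapse pass with a single run-start counting
-- pass over the original string (the collapsed string is never built); same return value.

-- ===== PORT A =====
-- while loop deleting input_string[i] whenever it equals its left neighbour
-- (fuel = a plain upper bound on the remaining iterations, only to make the loop total;
--  it never alters the computed value)
def pvCollapseLoop (fuel : Nat) (cs : List Char) (i : Nat) : List Char :=
  match fuel with
  | 0 => cs
  | fuel + 1 =>
    if i < cs.length then
      if PySem.List.pyGetD cs (i : Int) ' ' == PySem.List.pyGetD cs ((i : Int) - 1) ' ' then
        pvCollapseLoop fuel (PySem.List.slice cs none (some (i : Int)) ++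
                        PySem.List.slice cs (some ((i : Int) + 1)) none) i
      else
        pvCollapseLoop fuel cs (i + 1)
    else cs

def solution (input_string : String) : String :=
  let collapsed := pvCollapseLoop input_string.toList.length input_string.toList 1
  let count := collapsed.foldl
      (fun (d : PySem.Dict Char Int) s =>
        if d.contains s then d.insert s (d.getD s 0 + 1) else d.insert s 1)
      PySem.Dict.empty
  let answer := count.keys.foldl
      (fun (a : List Char) cnt => if count.getD cnt 0 > 1 then a ++ [cnt] else a) []
  let answer := PySem.List.sorted answer (fun c => c) false
  if answer.isEmpty then "N" else String.ofList answer

-- ===== PORT B =====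
def solution_alt (input_string : String) : String :=
  let st := input_string.toList.foldl
      (fun (st : PySem.Dict Char Int × Option Char) ch =>
        ((if some ch ≠ st.2 then st.1.insert ch (st.1.getD ch 0 + 1) else st.1), some ch))
      (PySem.Dict.empty, none)
  let lonely := PySem.List.sorted ((st.1.items.filter (fun p => p.2 > 1)).map (·.1))
      (fun c => c) false
  if lonely.isEmpty then "N" else String.ofList lonely

-- ===== PRECONDITION & SPEC =====
def Spec_solution (input_string : String) (out : String) : Prop := out = solution_alt input_string
instance (input_string : String) (out : String) : Decidable (Spec_solution input_string out) := by unfold Spec_solution; infer_instance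

-- ===== CLAIM (what is proved, stated in full; the proofs are below) =====
def Claim_equal_solution : Prop := ∀ (input_string : String), Dom_solution input_string → Spec_solution input_string (solution input_string)

-- ===== LEMMAS AND PROOFS =====

-- the adjacent-duplicate collapse, as a structural recursion with the previous kept char
def pvCf (prev : Option Char) : List Char → List Char
  | [] => []
  | c :: t => if some c = prev then pvCf prev t else c :: pvCf (some c) t

theorem pvCf_cons (prev : Option Char) (c : Char) (t : List Char) :
    pvCf prev (c :: t) = if some c = prev then pvCf prev t else c :: pvCf (some c) t := rfl

theorem pvCollapseLoop_spec (rest : List Char) : ∀ (fuel : Nat) (p : List Char) (a : Char),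
    rest.length < fuel →
    pvCollapseLoop fuel (p ++ a :: rest) (p.length + 1) = p ++ a :: pvCf (some a) rest := by
  induction rest with
  | nil =>
    intro fuel p a hf
    match fuel, hf with
    | fuel + 1, _ => simp [pvCollapseLoop, pvCf]
  | cons c t ih =>
    intro fuel p a hf
    match fuel, hf with
    | fuel + 1, hf =>
    rw [pvCollapseLoop]
    have hl : p.length + 1 < (p ++ a :: c :: t).length := by simp
    rw [if_pos hl]
    have hg1 : PySem.List.pyGetD (p ++ a :: c :: t) ((p.length + 1 : Nat) : Int) ' ' = c := by
      rw [PySem.List.pyGetD_natCast, List.getD_append_right _ _ _ _ (by omega)]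
      simp [List.getD]
    have hg2 : PySem.List.pyGetD (p ++ a :: c :: t) (((p.length + 1 : Nat) : Int) - 1) ' ' = a := by
      have hc : ((p.length + 1 : Nat) : Int) - 1 = ((p.length : Nat) : Int) := by push_cast; ring
      rw [hc, PySem.List.pyGetD_natCast, List.getD_append_right _ _ _ _ (by omega)]
      simp [List.getD]
    rw [hg1, hg2]
    by_cases hca : c = a
    · subst hca
      simp only [BEq.rfl, if_true]
      have hs : PySem.List.slice (p ++ c :: c :: t) none (some ((p.length + 1 : Nat) : Int)) ++
          PySem.List.slice (p ++ c :: c :: t) (some (((p.length + 1 : Nat) : Int) + 1)) none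
          = p ++ c :: t := by
        have hc2 : ((p.length + 1 : Nat) : Int) + 1 = ((p.length + 2 : Nat) : Int) := by push_cast; ring
        rw [PySem.List.slice_to_natCast, hc2, PySem.List.slice_from_natCast]
        rw [List.take_append, List.drop_append]
        simp [List.take_of_length_le, List.drop_of_length_le,
              show p.length + 1 - p.length = 1 by omega,
              show p.length + 2 - p.length = 2 by omega]
      rw [hs, ih fuel p c (by simpa using Nat.lt_of_succ_lt_succ hf)]
      simp [pvCf]
    · have hb : (c == a) = false := by simp [hca]
      rw [hb]
      simp only [Bool.false_eq_true, if_false]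
      have e1 : p ++ a :: c :: t = (p ++ [a]) ++ c :: t := by simp
      have e2 : p.length + 1 + 1 = (p ++ [a]).length + 1 := by simp
      rw [e1, e2, ih fuel (p ++ [a]) c (by simpa using Nat.lt_of_succ_lt_succ hf)]
      simp [pvCf, hca]

theorem pvCollapseLoop_one (cs : List Char) :
    pvCollapseLoop cs.length cs 1 = pvCf none cs := by
  cases cs with
  | nil => rfl
  | cons c t =>
    have h := pvCollapseLoop_spec t (t.length + 1) [] c (by simp)
    simpa [pvCf] using h

theorem pvFoldB_spec (l : List Char) : ∀ (d : PySem.Dict Char Int) (prev : Option Char),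
    (l.foldl
      (fun (st : PySem.Dict Char Int × Option Char) ch =>
        ((if some ch ≠ st.2 then st.1.insert ch (st.1.getD ch 0 + 1) else st.1), some ch))
      (d, prev)).1
    = (pvCf prev l).foldl (fun d x => d.insert x (d.getD x 0 + 1)) d := by
  induction l with
  | nil => intro d prev; rfl
  | cons c t ih =>
    intro d prev
    rw [List.foldl_cons]
    dsimp only
    by_cases h : some c = prev
    · subst h
      rw [if_neg (not_not_intro rfl), ih d (some c), pvCf_cons, if_pos rfl]
    · rw [if_pos h, ih _ (some c), pvCf_cons, if_neg h, List.foldl_cons]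

theorem pvFoldA_eq (l : List Char) : ∀ (d : PySem.Dict Char Int),
    l.foldl (fun (d : PySem.Dict Char Int) s =>
        if d.contains s then d.insert s (d.getD s 0 + 1) else d.insert s 1) d
    = l.foldl (fun d x => d.insert x (d.getD x 0 + 1)) d := by
  induction l with
  | nil => intro d; rfl
  | cons c t ih =>
    intro d
    by_cases h : d.contains c = true
    · simp [h, ih]
    · have h0 : d.getD c 0 = 0 :=
        PySem.Dict.getD_of_not_contains d 0 (by simpa using h)
      simp [h, ih, h0]

theorem pvTail_eq (x : List Char) :
    (PySem.Dict.counter x).keys.foldl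
      (fun (a : List Char) cnt => if (PySem.Dict.counter x).getD cnt 0 > 1 then a ++ [cnt] else a) []
    = (((PySem.Dict.counter x).items.filter (fun p => p.2 > 1)).map (·.1)) := by
  have hfun : (fun (a : List Char) cnt =>
      if (PySem.Dict.counter x).getD cnt 0 > 1 then a ++ [cnt] else a)
      = (fun (a : List Char) cnt =>
        if (fun k => decide ((PySem.Dict.counter x).getD k 0 > 1)) cnt = true
        then a ++ [id cnt] else a) := by
    funext a cnt; simp
  rw [hfun, PySem.List.foldl_append_if]
  simp [PySem.Dict.keys_counter, PySem.Dict.items_counter, PySem.Dict.getD_counter,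
        List.filter_map, List.map_map, Function.comp_def]

-- ===== VERDICT (by name: the statement is the Claim_ definition above) =====
theorem solution_spec : Claim_equal_solution := by
  intro s _
  unfold Spec_solution solution solution_alt
  simp only [pvCollapseLoop_one, pvFoldA_eq, pvFoldB_spec,
      PySem.Dict.foldl_insert_getD_add_one_eq_counter, pvTail_eq]
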